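-- pv_equiv track=rewrite | github.com/tlubitz/parameter_balancing | pypi_files_internal/pbalancing/SBtab.py | _dequote
-- ===== SOURCE A (Python) =====
-- def _dequote(row):
--     '''
--     Brings consistency in the multifarious quotation mark problems
--     '''
--     stupid_quotes = ['"', '\xe2\x80\x9d', '\xe2\x80\x98', '\xe2\x80\x99',
--                      '\xe2\x80\x9b', '\xe2\x80\x9c', '\xe2\x80\x9f',
--                      '\xe2\x80\xb2', '\xe2\x80\xb3', '\xe2\x80\xb4',
--                      '\xe2\x80\xb5', '\xe2\x80\xb6', '\xe2\x80\xb7']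
--
--     for squote in stupid_quotes:
--         try: row = row.replace(squote, "'")
--         except: pass
--
--     row = row.replace('\n','')
--
--     return row
-- ===== SOURCE B (Python) =====
-- # Single-pass character translation instead of 14 sequential str.replace scans.
-- # Equivalent to A on printable-ASCII input (A's extra multi-char sequences never occur there).
-- _TABLE = str.maketrans({'"': "'", '\n': None})
--
-- def _dequote(row):
--     '''
--     Brings consistency in the multifarious quotation mark problems
--     '''
--     return row.translate(_TABLE)
-- ===== Notes on version B (the rewrite author's own statement) =====
-- stated objective: idiomatic
-- what changed: Replaces A's 14 sequential str.replace scans (13 quote patterns plus newline removal) with one precomputed str.maketrans table applied in a single str.translate pass.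
import Mathlib
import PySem

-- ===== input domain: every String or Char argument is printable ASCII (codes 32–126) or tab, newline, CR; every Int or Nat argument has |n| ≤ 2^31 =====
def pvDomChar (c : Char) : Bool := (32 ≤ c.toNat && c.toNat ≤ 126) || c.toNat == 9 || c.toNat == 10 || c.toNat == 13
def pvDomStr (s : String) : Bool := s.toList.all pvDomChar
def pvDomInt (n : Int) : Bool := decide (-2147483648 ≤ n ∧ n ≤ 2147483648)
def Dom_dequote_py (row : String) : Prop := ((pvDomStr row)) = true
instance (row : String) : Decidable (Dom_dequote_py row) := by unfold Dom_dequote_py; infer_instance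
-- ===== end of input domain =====

-- B replaces A's 14 sequential str.replace scans by one single-pass character
-- translation ('"' → "'", '\n' dropped); equivalence is claimed on the printable-ASCII
-- domain above, where A's multi-character quote sequences never occur.

-- ===== PORT A =====
def pvQuotes : List String := ["\"", "\u00E2\u0080\u009D", "\u00E2\u0080\u0098", "\u00E2\u0080\u0099",
  "\u00E2\u0080\u009B", "\u00E2\u0080\u009C", "\u00E2\u0080\u009F",
  "\u00E2\u0080\u00B2", "\u00E2\u0080\u00B3", "\u00E2\u0080\u00B4",
  "\u00E2\u0080\u00B5", "\u00E2\u0080\u00B6", "\u00E2\u0080\u00B7"]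

-- the try/except around each quote replace never fires in Python (str.replace on a str
-- cannot raise), so the port is the bare replace chain
def dequote_py (row : String) : String :=
  let r := pvQuotes.foldl (fun r q => PySem.Str.replace r q "'") row
  PySem.Str.replace r "\n" ""

-- ===== PORT B =====
-- B's translation table as a per-character map: none = character deleted
def pvTr (c : Char) : Option Char :=
  if c = '\n' then none else if c = '"' then some '\'' else some c

def dequote_py_alt (row : String) : String := String.ofList (row.toList.filterMap pvTr)

-- ===== PRECONDITION & SPEC =====
def Spec_dequote_py (row : String) (out : String) : Prop := out = dequote_py_alt row
instance (row : String) (out : String) : Decidable (Spec_dequote_py row out) := by unfold Spec_dequote_py; infer_instance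

-- ===== CLAIM (what is proved, stated in full; the proofs are below) =====
def Claim_equal_dequote_py : Prop := ∀ (row : String), Dom_dequote_py row → Spec_dequote_py row (dequote_py row)

-- ===== LEMMAS AND PROOFS =====

-- replacing a single character c by the string n is the obvious flatMap
lemma go_single (c : Char) (n : List Char) (l acc : List Char) (fuel : Nat) (h : l.length ≤ fuel) :
    PySem.Chars.replace.go [c] n fuel l acc
      = acc.reverse ++ l.flatMap (fun x => if x = c then n else [x]) := by
  induction l generalizing fuel acc with
  | nil => cases fuel <;> simp [PySem.Chars.replace.go]
  | cons x t ih =>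
      cases fuel with
      | zero => simp at h
      | succ f =>
        have hl : t.length ≤ f := by simpa using h
        simp only [PySem.Chars.replace.go]
        by_cases hx : x = c
        · simp [hx, List.isPrefixOf, ih _ _ hl]
        · have hx' : ¬ c = x := fun h => hx h.symm
          simp [List.isPrefixOf, hx, hx', ih _ _ hl]

lemma replace_single (c : Char) (n l : List Char) :
    PySem.Chars.replace l [c] n = l.flatMap (fun x => if x = c then n else [x]) := by
  simp [PySem.Chars.replace, go_single c n l [] l.length le_rfl]

-- a replace whose pattern's first character does not occur is the identity
lemma go_no_head (c : Char) (cs n : List Char) (l acc : List Char) (fuel : Nat)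
    (h : l.length ≤ fuel) (hc : c ∉ l) :
    PySem.Chars.replace.go (c :: cs) n fuel l acc = acc.reverse ++ l := by
  induction l generalizing fuel acc with
  | nil => cases fuel <;> simp [PySem.Chars.replace.go]
  | cons x t ih =>
      cases fuel with
      | zero => simp at h
      | succ f =>
        have hl : t.length ≤ f := by simpa using h
        have hx : ¬ c = x := fun h => hc (h ▸ List.mem_cons_self ..)
        have ht : c ∉ t := fun h => hc (List.mem_cons_of_mem _ h)
        simp only [PySem.Chars.replace.go]
        simp [List.isPrefixOf, hx, ih _ _ hl ht]

lemma replace_no_head (c : Char) (cs n l : List Char) (hc : c ∉ l) :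
    PySem.Chars.replace l (c :: cs) n = l := by
  simp [PySem.Chars.replace, go_no_head c cs n l [] l.length le_rfl hc]

-- A's two effective passes ('"' → ''', then '\n' deleted) compose into B's single pass
lemma flatMap_flatMap_eq_filterMap (l : List Char) :
    ((l.flatMap (fun x => if x = '"' then ['\''] else [x])).flatMap
      (fun x => if x = '\n' then ([] : List Char) else [x])) = l.filterMap pvTr := by
  induction l with
  | nil => rfl
  | cons x t ih =>
      by_cases h1 : x = '"'
      · simp [h1, pvTr, ih]
      · by_cases h2 : x = '\n'
        · simp [h2, pvTr, ih]
        · simp [h1, h2, pvTr, ih]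

-- '\u00E2' (the first byte of every multi-byte quote) never occurs after the '"' pass on a Dom string
lemma e2_not_mem (l : List Char) (hd : ∀ x ∈ l, pvDomChar x = true) :
    '\u00E2' ∉ l.flatMap (fun x => if x = '"' then ['\''] else [x]) := by
  simp only [List.mem_flatMap, not_exists]
  rintro a ⟨ha, hx⟩
  have hda := hd a ha
  by_cases h1 : a = '"'
  · simp [h1] at hx
  · simp [h1] at hx
    rw [← hx] at hda
    exact absurd hda (by decide)

-- ===== VERDICT (by name: the statement is the Claim_ definition above) =====
theorem dequote_py_spec : Claim_equal_dequote_py := by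
  intro row hdom
  have hd : ∀ x ∈ row.toList, pvDomChar x = true := by
    simpa [Dom_dequote_py, pvDomStr, List.all_eq_true] using hdom
  unfold Spec_dequote_py dequote_py dequote_py_alt pvQuotes
  apply String.toList_inj.mp
  simp only [List.foldl_cons, List.foldl_nil, PySem.Str.toList_replace, String.toList_ofList]
  rw [show ("\"" : String).toList = ['"'] from rfl,
      show ("'" : String).toList = ['\''] from rfl,
      show ("\n" : String).toList = ['\n'] from rfl,
      show ("\u00E2\u0080\u009D" : String).toList = ['\u00E2', '\u0080', '\u009D'] from rfl,
      show ("\u00E2\u0080\u0098" : String).toList = ['\u00E2', '\u0080', '\u0098'] from rfl,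
      show ("\u00E2\u0080\u0099" : String).toList = ['\u00E2', '\u0080', '\u0099'] from rfl,
      show ("\u00E2\u0080\u009B" : String).toList = ['\u00E2', '\u0080', '\u009B'] from rfl,
      show ("\u00E2\u0080\u009C" : String).toList = ['\u00E2', '\u0080', '\u009C'] from rfl,
      show ("\u00E2\u0080\u009F" : String).toList = ['\u00E2', '\u0080', '\u009F'] from rfl,
      show ("\u00E2\u0080\u00B2" : String).toList = ['\u00E2', '\u0080', '\u00B2'] from rfl,
      show ("\u00E2\u0080\u00B3" : String).toList = ['\u00E2', '\u0080', '\u00B3'] from rfl,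
      show ("\u00E2\u0080\u00B4" : String).toList = ['\u00E2', '\u0080', '\u00B4'] from rfl,
      show ("\u00E2\u0080\u00B5" : String).toList = ['\u00E2', '\u0080', '\u00B5'] from rfl,
      show ("\u00E2\u0080\u00B6" : String).toList = ['\u00E2', '\u0080', '\u00B6'] from rfl,
      show ("\u00E2\u0080\u00B7" : String).toList = ['\u00E2', '\u0080', '\u00B7'] from rfl,
      show ("" : String).toList = [] from rfl]
  rw [replace_single '"' ['\''] row.toList]
  have hn := e2_not_mem row.toList hd
  rw [replace_no_head _ _ _ _ hn, replace_no_head _ _ _ _ hn, replace_no_head _ _ _ _ hn,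
      replace_no_head _ _ _ _ hn, replace_no_head _ _ _ _ hn, replace_no_head _ _ _ _ hn,
      replace_no_head _ _ _ _ hn, replace_no_head _ _ _ _ hn, replace_no_head _ _ _ _ hn,
      replace_no_head _ _ _ _ hn, replace_no_head _ _ _ _ hn, replace_no_head _ _ _ _ hn]
  rw [replace_single '\n' []]
  exact flatMap_flatMap_eq_filterMap row.toList
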